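-- pv_equiv track=rewrite | github.com/obalderes/project1-pd7 | Jules_Skrill/group.py | createPeriodStudentsDict
-- ===== SOURCE A (Python) =====
-- def createPeriodStudentsDict(lines):
--     studentsByPeriod = {}
--     for line in lines:
--         period = line[-1] #period is assured to be the last character
--         name = line[:-2] #name is assured to be everything but the last 2 characters
--         if period not in studentsByPeriod:
--             studentsByPeriod[period] = []
--         studentsByPeriod[period].append(name)
--     return studentsByPeriod
-- ===== SOURCE B (Python) =====
-- def createPeriodStudentsDict(lines):
--     periods = dict.fromkeys(line[-1] for line in lines)
--     return {p: [line[:-2] for line in lines if line[-1] == p] for p in periods}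
-- ===== Notes on version B (the rewrite author's own statement) =====
-- stated objective: idiomatic
-- what changed: B replaces A's incremental dict-building loop (membership test, init-to-[], append) with a dict.fromkeys dedup of the period characters followed by one dict comprehension that filters the names per period.
import Mathlib
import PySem

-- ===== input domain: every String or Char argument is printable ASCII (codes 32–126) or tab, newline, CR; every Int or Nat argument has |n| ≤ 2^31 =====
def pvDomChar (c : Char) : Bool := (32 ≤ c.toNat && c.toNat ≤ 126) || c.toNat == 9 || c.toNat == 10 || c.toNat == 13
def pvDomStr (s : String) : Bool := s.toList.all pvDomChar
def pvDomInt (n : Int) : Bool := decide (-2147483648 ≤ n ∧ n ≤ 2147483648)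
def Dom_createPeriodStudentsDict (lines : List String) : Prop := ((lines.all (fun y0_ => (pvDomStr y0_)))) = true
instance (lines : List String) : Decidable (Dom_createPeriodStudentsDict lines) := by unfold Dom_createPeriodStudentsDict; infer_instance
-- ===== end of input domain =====

-- B: dedup of period keys + one per-period filter comprehension instead of A's incremental
-- dict-building loop (idiomatic; same results, not claimed faster).


-- ===== PORT A =====
def createPeriodStudentsDict (lines : List String) : List (String × List String) :=
  (lines.foldl (fun (d : PySem.Dict String (List String)) line =>
      match PySem.Str.pyGet? line (-1) with          -- period = line[-1] (none = IndexError, excluded by Pre_)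
      | none => d
      | some c =>
        let period : String := String.ofList [c]
        let name : String := PySem.Str.slice line none (some (-2))   -- name = line[:-2]
        let d := if !(d.contains period) then d.insert period [] else d
        d.modify period [] (fun v => v ++ [name])    -- studentsByPeriod[period].append(name)
    ) PySem.Dict.empty).items

-- ===== PORT B =====
-- line[-1] as a 1-char string ("" only where Python raises, outside Pre_)
def pvKey (l : String) : String :=
  match PySem.Str.pyGet? l (-1) with
  | some c => String.ofList [c]
  | none => ""

def pvName (l : String) : String := PySem.Str.slice l none (some (-2))   -- line[:-2]

def createPeriodStudentsDict_alt (lines : List String) : List (String × List String) :=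
  (PySem.List.dedup (lines.map pvKey)).map
    (fun p => (p, (lines.filter (fun l => pvKey l == p)).map pvName))

-- ===== PRECONDITION & SPEC =====
-- Pre_ excludes lists containing an empty line, on which A raises IndexError at line[-1].
def Pre_createPeriodStudentsDict (lines : List String) : Prop := ∀ l ∈ lines, l ≠ ""
instance (lines : List String) : Decidable (Pre_createPeriodStudentsDict lines) := by
  unfold Pre_createPeriodStudentsDict; infer_instance

def pvWitness_createPeriodStudentsDict : List String := ["amy 1", "bob 2", "cal 1"]

def Spec_createPeriodStudentsDict (lines : List String) (out : List (String × List String)) : Prop := out = createPeriodStudentsDict_alt lines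
instance (lines : List String) (out : List (String × List String)) : Decidable (Spec_createPeriodStudentsDict lines out) := by unfold Spec_createPeriodStudentsDict; infer_instance

-- ===== CLAIM (what is proved, stated in full; the proofs are below) =====
def Claim_equal_createPeriodStudentsDict : Prop := ∀ (lines : List String), Dom_createPeriodStudentsDict lines → Pre_createPeriodStudentsDict lines → Spec_createPeriodStudentsDict lines (createPeriodStudentsDict lines)

-- ===== LEMMAS AND PROOFS =====

-- A's 'if period not in d: d[period] = []' followed by the append is one modify.
theorem pv_step_eq {d : PySem.Dict String (List String)} (k : String) (n : String) :
    (if !(d.contains k) then d.insert k [] else d).modify k [] (fun v => v ++ [n])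
      = d.modify k [] (fun v => v ++ [n]) := by
  by_cases h : d.contains k
  · simp [h]
  · simp only [Bool.not_eq_true] at h
    simp [h, PySem.Dict.modify, PySem.Dict.getD_insert_self,
      PySem.Dict.insert_insert_self, PySem.Dict.getD_of_not_contains d ([] : List String) h]

theorem pv_key_some {l : String} (h : l ≠ "") :
    ∃ c, PySem.Str.pyGet? l (-1) = some c ∧ pvKey l = String.ofList [c] := by
  have hne : l.toList ≠ [] := fun hc => h (String.toList_eq_nil_iff.mp hc)
  obtain ⟨c, hc⟩ := Option.isSome_iff_exists.mp (List.getLast?_isSome.mpr hne)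
  have hg : PySem.Str.pyGet? l (-1) = some c := by
    simp [PySem.Str.pyGet?, PySem.List.pyGet?_neg_one, hc]
  exact ⟨c, hg, by unfold pvKey; rw [hg]⟩

-- A's loop (inside Pre_) is a pure modify-fold keyed by pvKey.
theorem pv_foldl_eq (lines : List String) (h : ∀ l ∈ lines, l ≠ "") :
    (lines.foldl (fun (d : PySem.Dict String (List String)) line =>
      match PySem.Str.pyGet? line (-1) with
      | none => d
      | some c =>
        let period : String := String.ofList [c]
        let name : String := PySem.Str.slice line none (some (-2))
        let d := if !(d.contains period) then d.insert period [] else d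
        d.modify period [] (fun v => v ++ [name])) PySem.Dict.empty)
    = lines.foldl (fun d line => d.modify (pvKey line) [] (fun v => v ++ [pvName line])) PySem.Dict.empty := by
  apply PySem.List.foldl_congr_mem
  intro acc x hx
  obtain ⟨c, hc, hk⟩ := pv_key_some (h x hx)
  simp only [hc, hk, pvName]
  exact pv_step_eq _ _

theorem createPeriodStudentsDict_spec_aux (lines : List String)
    (h : ∀ l ∈ lines, l ≠ "") :
    createPeriodStudentsDict lines = createPeriodStudentsDict_alt lines := by
  unfold createPeriodStudentsDict createPeriodStudentsDict_alt
  rw [pv_foldl_eq lines h]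
  have hfold : lines.foldl (fun (d : PySem.Dict String (List String)) line =>
        d.modify (pvKey line) [] (fun v => v ++ [pvName line])) PySem.Dict.empty
      = (lines.map (fun l => (pvKey l, pvName l))).foldl
          (fun d p => d.modify p.1 [] (fun v => v ++ [p.2])) PySem.Dict.empty := by
    rw [List.foldl_map]
  have hnd : (lines.foldl (fun (d : PySem.Dict String (List String)) line =>
        d.modify (pvKey line) [] (fun v => v ++ [pvName line])) PySem.Dict.empty).keys.Nodup :=
    PySem.Dict.nodup_keys_foldl_modify_key lines pvKey []
      (fun _ x v => v ++ [pvName x]) _ PySem.Dict.nodup_keys_empty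
  rw [PySem.Dict.items_eq_map_keys _ hnd []]
  rw [PySem.Dict.keys_foldl_modify_key lines pvKey [] (fun _ x v => v ++ [pvName x])]
  simp only [PySem.Dict.keys_empty, PySem.Set.update_nil_left, PySem.List.dedup_eq_ofList]
  apply List.map_congr_left
  intro k _
  rw [hfold, PySem.Dict.getD_foldl_modify_append]
  simp [List.filter_map, List.map_map, Function.comp_def]

-- ===== VERDICT (by name: the statement is the Claim_ definition above) =====
theorem createPeriodStudentsDict_spec : Claim_equal_createPeriodStudentsDict := by
  intro lines _ hpre
  exact createPeriodStudentsDict_spec_aux lines hpre
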